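-- pv_equiv track=rewrite | github.com/ryankalfus/nba-whistle-momentum-index | nba_pbp_utils.py | calculate_context_flags
-- ===== SOURCE A (Python) =====
-- from typing import Any, Mapping, Sequence
--
-- def calculate_context_flags(values: Sequence[int], window: int = 2) -> tuple[list[int], list[int]]:
--     normalized_values = [int(value) for value in values]
--     prior_flags: list[int] = []
--     next_flags: list[int] = []
--
--     for index, _ in enumerate(normalized_values):
--         prior_flags.append(int(any(normalized_values[max(0, index - window) : index])))
--         next_flags.append(int(any(normalized_values[index + 1 : index + 1 + window])))
--
--     return prior_flags, next_flags
-- ===== SOURCE B (Python) =====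
-- def calculate_context_flags(values, window=2):
--     # One linear pass per direction: a flag is set iff the nearest truthy value on
--     # that side is within `window` positions, tracked by its index.
--     vals = [int(v) for v in values]
--
--     def recent_flags(seq):
--         flags = []
--         last = None  # index of the most recent truthy value seen so far
--         for i, v in enumerate(seq):
--             flags.append(1 if last is not None and i - last <= window else 0)
--             if v:
--                 last = i
--         return flags
--
--     prior = recent_flags(vals)
--     nxt = recent_flags(vals[::-1])[::-1]
--     return prior, nxt
-- ===== Notes on version B (the rewrite author's own statement) =====
-- stated objective: faster
-- what changed: Replaces the per-index window slices and any() scans with one linear pass per direction that tracks the index of the nearest truthy value, so each flag is a single distance comparison (O(n) vs O(n*window)).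
-- intended difference: When window < -(i+1) for some index i, A's slice stop i+1+window is negative so Python wraps it to the end of the list and A can flag a 'next' value far to the right as context; B returns 0 there, the intended value since a non-positive window means no following context. — e.g. on calculate_context_flags([0, 1, 0], -2): A returns ([0, 0, 0], [1, 0, 0]), B returns ([0, 0, 0], [0, 0, 0])
import Mathlib
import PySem

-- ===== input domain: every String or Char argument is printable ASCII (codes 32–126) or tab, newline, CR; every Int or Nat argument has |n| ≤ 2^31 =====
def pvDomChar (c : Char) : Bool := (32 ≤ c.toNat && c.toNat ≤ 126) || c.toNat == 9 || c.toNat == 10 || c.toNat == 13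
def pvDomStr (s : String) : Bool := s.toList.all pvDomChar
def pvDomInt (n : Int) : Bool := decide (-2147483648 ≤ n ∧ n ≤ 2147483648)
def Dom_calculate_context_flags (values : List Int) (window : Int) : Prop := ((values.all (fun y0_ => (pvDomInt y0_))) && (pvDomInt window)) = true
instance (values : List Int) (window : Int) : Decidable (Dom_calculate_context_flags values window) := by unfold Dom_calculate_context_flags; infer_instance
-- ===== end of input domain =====

-- B replaces A's per-index window slices with one linear pass per direction tracking the
-- index of the nearest truthy value; objective: faster (asymptotic, O(n·window) → O(n)).
-- A and B differ exactly where a very negative window makes A's slice stop wrap (see D_ below).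


-- ===== PORT A =====
-- `int(any(normalized[max(0, i-window) : i]))` and `int(any(normalized[i+1 : i+1+window]))`,
-- named so the loop body stays readable; slices via PySem.List.slice.
def pvAPrior (normalized : List Int) (window : Int) (index : Nat) : Int :=
  if (PySem.List.slice normalized (some (max 0 ((index : Int) - window))) (some (index : Int))).any (fun v => decide (v ≠ 0)) then 1 else 0

def pvANext (normalized : List Int) (window : Int) (index : Nat) : Int :=
  if (PySem.List.slice normalized (some ((index : Int) + 1)) (some ((index : Int) + 1 + window))).any (fun v => decide (v ≠ 0)) then 1 else 0

-- `for index, _ in enumerate(normalized_values)` uses only the index: a fold over the index range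
def calculate_context_flags (values : List Int) (window : Int) : List Int × List Int :=
  let normalized := values.map (fun v => v)
  (List.range normalized.length).foldl
    (fun (st : List Int × List Int) (index : Nat) =>
      (st.1 ++ [pvAPrior normalized window index], st.2 ++ [pvANext normalized window index]))
    ([], [])

-- ===== PORT B =====
-- B's helper `recent_flags`: the enumerate loop as structural recursion over the list,
-- carrying the running index i and `last` (index of the most recent truthy value).
def pvRecentGo (window : Int) : List Int → Nat → Option Nat → List Int
  | [], _, _ => []
  | v :: rest, i, last =>
    (match last with
     | some l => if ((i : Int) - l ≤ window) then (1 : Int) else 0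
     | none => 0) :: pvRecentGo window rest (i + 1) (if v ≠ 0 then some i else last)

def pvRecentFlags (window : Int) (seq : List Int) : List Int := pvRecentGo window seq 0 none

def calculate_context_flags_alt (values : List Int) (window : Int) : List Int × List Int :=
  let vals := values.map (fun v => v)
  let prior := pvRecentFlags window vals
  let nxt := (pvRecentFlags window vals.reverse).reverse   -- recent_flags(vals[::-1])[::-1]
  (prior, nxt)

-- ===== PRECONDITION & SPEC =====
-- When window < -(i+1) for some index i, A's slice stop i+1+window is negative so Python wraps
-- it to the end of the list and A can flag a 'next' value far to the right as context; B returns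
-- 0 there, the intended value since a non-positive window means no following context.
def D_calculate_context_flags (values : List Int) (window : Int) : Prop :=
  ∃ i < values.length, (i : Int) + 1 + window < 0 ∧
    ∃ j < values.length, i < j ∧ (j : Int) < (values.length : Int) + i + 1 + window ∧ values.getD j 0 ≠ 0
instance (values : List Int) (window : Int) : Decidable (D_calculate_context_flags values window) := by unfold D_calculate_context_flags; infer_instance

def Spec_calculate_context_flags (values : List Int) (window : Int) (out : List Int × List Int) : Prop := ¬ D_calculate_context_flags values window → out = calculate_context_flags_alt values window
instance (values : List Int) (window : Int) (out : List Int × List Int) : Decidable (Spec_calculate_context_flags values window out) := by unfold Spec_calculate_context_flags; infer_instance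

def pvDiffWitness_calculate_context_flags : List Int × Int := ([0, 1, 0], -2)
def pvDiffWitnessOut_calculate_context_flags : (List Int × List Int) × (List Int × List Int) :=
  (([0, 0, 0], [1, 0, 0]), ([0, 0, 0], [0, 0, 0]))

-- ===== CLAIM (what is proved, stated in full; the proofs are below) =====
def Claim_unchanged_calculate_context_flags : Prop := ∀ (values : List Int) (window : Int), Dom_calculate_context_flags values window → Spec_calculate_context_flags values window (calculate_context_flags values window)
def Claim_changed_calculate_context_flags : Prop := Dom_calculate_context_flags (pvDiffWitness_calculate_context_flags.1) (pvDiffWitness_calculate_context_flags.2) ∧ D_calculate_context_flags (pvDiffWitness_calculate_context_flags.1) (pvDiffWitness_calculate_context_flags.2) ∧ calculate_context_flags (pvDiffWitness_calculate_context_flags.1) (pvDiffWitness_calculate_context_flags.2) = pvDiffWitnessOut_calculate_context_flags.1 ∧ calculate_context_flags_alt (pvDiffWitness_calculate_context_flags.1) (pvDiffWitness_calculate_context_flags.2) = pvDiffWitnessOut_calculate_context_flags.2 ∧ pvDiffWitnessOut_calculate_context_flags.1 ≠ pvDiffWitnessOut_calculate_context_flags.2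
def Claim_exact_calculate_context_flags : Prop := ∀ (values : List Int) (window : Int), Dom_calculate_context_flags values window → D_calculate_context_flags values window → calculate_context_flags values window ≠ calculate_context_flags_alt values window

-- ===== LEMMAS AND PROOFS =====

-- a fold that appends one element to each component is a pair of maps
theorem pv_foldl_pair_append (f g : Nat → Int) (l : List Nat) (acc : List Int × List Int) :
    l.foldl (fun (st : List Int × List Int) (i : Nat) => (st.1 ++ [f i], st.2 ++ [g i])) acc
      = (acc.1 ++ l.map f, acc.2 ++ l.map g) := by
  induction l generalizing acc with
  | nil => simp
  | cons x t ih => simp [List.foldl_cons, ih]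

theorem pv_clampIdx_eq (n : Nat) (b : Int) :
    PySem.List.clampIdx n b = (min (max (if b < 0 then b + n else b) 0) (n : Int)).toNat := by
  simp only [PySem.List.clampIdx]
  split_ifs <;> omega

theorem pv_slice_eq (xs : List Int) (a b : Int) :
    PySem.List.slice xs (some a) (some b)
      = (xs.drop (PySem.List.clampIdx xs.length a)).take (PySem.List.clampIdx xs.length b - PySem.List.clampIdx xs.length a) := by
  simp [PySem.List.slice]

-- a truthy value sits in the drop/take segment ↔ a truthy index in [a, b)
theorem pv_seg_any (xs : List Int) (a b : Nat) :
    ((xs.drop a).take (b - a)).any (fun v => decide (v ≠ 0)) = true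
      ↔ ∃ j, a ≤ j ∧ j < b ∧ j < xs.length ∧ xs.getD j 0 ≠ 0 := by
  rw [List.any_eq_true]
  constructor
  · rintro ⟨v, hv, hp⟩
    obtain ⟨t, ht, hvt⟩ := List.mem_iff_getElem.mp hv
    have hlen : t < b - a ∧ a + t < xs.length := by
      simp only [List.length_take, List.length_drop, lt_min_iff] at ht; omega
    refine ⟨a + t, by omega, by omega, hlen.2, ?_⟩
    rw [List.getD_eq_getElem xs 0 hlen.2]
    have hel : ((xs.drop a).take (b - a))[t] = xs[a + t] := by
      rw [List.getElem_take, List.getElem_drop]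
    rw [← hel, hvt]
    simpa using hp
  · rintro ⟨j, haj, hjb, hjn, ht⟩
    have hlen : j - a < ((xs.drop a).take (b - a)).length := by
      simp only [List.length_take, List.length_drop, lt_min_iff]; omega
    rw [List.getD_eq_getElem xs 0 hjn] at ht
    refine ⟨xs[j], ?_, by simpa using ht⟩
    rw [List.mem_iff_getElem]
    refine ⟨j - a, hlen, ?_⟩
    rw [List.getElem_take, List.getElem_drop]
    congr 1; omega

-- `last` after consuming a list starting at index k
def pvLastAfter : List Int → Nat → Option Nat → Option Nat
  | [], _, last => last
  | v :: rest, k, last => pvLastAfter rest (k + 1) (if v ≠ 0 then some k else last)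

def pvFlag (window : Int) (i : Nat) : Option Nat → Int
  | some l => if (i : Int) - l ≤ window then 1 else 0
  | none => 0

def pvLi (xs : List Int) (i : Nat) : Option Nat := pvLastAfter (xs.take i) 0 none

theorem pvRecentGo_length (w : Int) (ys : List Int) (k : Nat) (last : Option Nat) :
    (pvRecentGo w ys k last).length = ys.length := by
  induction ys generalizing k last with
  | nil => rfl
  | cons v rest ih => simp [pvRecentGo, ih]

theorem pvRecentGo_getD (w : Int) (ys : List Int) (k : Nat) (last : Option Nat) (j : Nat)
    (hj : j < ys.length) :
    (pvRecentGo w ys k last).getD j 0 = pvFlag w (k + j) (pvLastAfter (ys.take j) k last) := by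
  induction ys generalizing k last j with
  | nil => simp at hj
  | cons v rest ih =>
    cases j with
    | zero =>
      cases last <;> simp [pvRecentGo, pvLastAfter, pvFlag]
    | succ j' =>
      have hj' : j' < rest.length := by simpa using hj
      simp only [pvRecentGo, List.getD_cons_succ, List.take_succ_cons, pvLastAfter]
      rw [ih _ _ j' hj']
      congr 1
      omega

theorem pvLastAfter_append (ys : List Int) (v : Int) (k : Nat) (last : Option Nat) :
    pvLastAfter (ys ++ [v]) k last
      = if v ≠ 0 then some (k + ys.length) else pvLastAfter ys k last := by
  induction ys generalizing k last with
  | nil => simp [pvLastAfter]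
  | cons u rest ih =>
    simp only [List.cons_append, pvLastAfter, ih]
    split_ifs <;> simp only [List.length_cons] <;> first | rfl | (congr 1; omega)

theorem pvLi_succ (xs : List Int) (i : Nat) (hi : i < xs.length) :
    pvLi xs (i + 1) = if xs.getD i 0 ≠ 0 then some i else pvLi xs i := by
  unfold pvLi
  rw [List.take_add_one, List.getElem?_eq_getElem hi]
  simp only [Option.toList_some]
  rw [pvLastAfter_append]
  rw [List.getD_eq_getElem xs 0 hi]
  simp [List.length_take, Nat.min_eq_left (Nat.le_of_lt hi)]

theorem pvLi_some (xs : List Int) (i : Nat) (hi : i ≤ xs.length) (l : Nat)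
    (h : pvLi xs i = some l) : l < i ∧ xs.getD l 0 ≠ 0 := by
  induction i with
  | zero => simp [pvLi, pvLastAfter] at h
  | succ i' ih =>
    rw [pvLi_succ xs i' (by omega)] at h
    split_ifs at h with ht
    · cases h; exact ⟨by omega, ht⟩
    · have := ih (by omega) h
      exact ⟨by omega, this.2⟩

theorem pvLi_max (xs : List Int) (i : Nat) (hi : i ≤ xs.length) (j : Nat)
    (hj : j < i) (ht : xs.getD j 0 ≠ 0) : ∃ l, pvLi xs i = some l ∧ j ≤ l := by
  induction i with
  | zero => omega
  | succ i' ih =>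
    rw [pvLi_succ xs i' (by omega)]
    by_cases he : xs.getD i' 0 ≠ 0
    · exact ⟨i', by simp only [he, if_true, if_pos he], by omega⟩
    · simp only [he, if_false]
      rcases Nat.lt_or_ge j i' with hlt | hge
      · exact ih (by omega) hlt
      · have : j = i' := by omega
        subst this; exact absurd ht he

theorem pv_flag_iff (xs : List Int) (w : Int) (i : Nat) (hi : i ≤ xs.length) :
    pvFlag w i (pvLi xs i)
      = if (∃ j, j < i ∧ (i : Int) - j ≤ w ∧ xs.getD j 0 ≠ 0) then 1 else 0 := by
  cases hL : pvLi xs i with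
  | none =>
    have hne : ¬ ∃ j, j < i ∧ (i : Int) - j ≤ w ∧ xs.getD j 0 ≠ 0 := by
      rintro ⟨j, hj, _, ht⟩
      obtain ⟨l, hl, _⟩ := pvLi_max xs i hi j hj ht
      rw [hL] at hl; simp at hl
    rw [if_neg hne]; rfl
  | some l =>
    obtain ⟨hl, htl⟩ := pvLi_some xs i hi l hL
    by_cases hw : (i : Int) - l ≤ w
    · rw [if_pos ⟨l, hl, hw, htl⟩]; simp [pvFlag, hw]
    · have hne : ¬ ∃ j, j < i ∧ (i : Int) - j ≤ w ∧ xs.getD j 0 ≠ 0 := by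
        rintro ⟨j, hj, hjw, ht⟩
        obtain ⟨l', hl', hjl⟩ := pvLi_max xs i hi j hj ht
        rw [hL] at hl'
        have : l' = l := by cases hl'; rfl
        subst this; exact hw (by omega)
      rw [if_neg hne]; simp [pvFlag, hw]

-- per-index agreement of the prior flags
theorem pv_point_prior (xs : List Int) (w : Int) (i : Nat) (hi : i < xs.length) :
    pvAPrior xs w i = pvFlag w i (pvLi xs i) := by
  rw [pv_flag_iff xs w i (le_of_lt hi)]
  unfold pvAPrior
  rw [pv_slice_eq]
  have hcb : PySem.List.clampIdx xs.length ((i : Nat) : Int) = i := by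
    rw [pv_clampIdx_eq]; omega
  rw [hcb]
  have hca : ((PySem.List.clampIdx xs.length (max 0 ((i : Int) - w)) : Nat) : Int)
      = min (max ((i : Int) - w) 0) (xs.length : Int) := by
    rw [pv_clampIdx_eq]; omega
  cases hA : ((xs.drop (PySem.List.clampIdx xs.length (max 0 ((i : Int) - w)))).take
      (i - PySem.List.clampIdx xs.length (max 0 ((i : Int) - w)))).any (fun v => decide (v ≠ 0)) with
  | true =>
    obtain ⟨j, hja, hji, hjn, ht⟩ := (pv_seg_any xs _ i).mp hA
    rw [if_pos rfl, if_pos ⟨j, hji, by omega, ht⟩]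
  | false =>
    rw [if_neg (by simp), if_neg ?_]
    rintro ⟨j, hj, hjw, ht⟩
    have : _ := (pv_seg_any xs (PySem.List.clampIdx xs.length (max 0 ((i : Int) - w))) i).mpr
      ⟨j, by omega, hj, by omega, ht⟩
    rw [hA] at this; exact Bool.noConfusion this

-- reversed-list lookup in terms of the original list
theorem pv_getD_reverse (xs : List Int) (j : Nat) (hj : j < xs.length) :
    xs.reverse.getD j 0 = xs.getD (xs.length - 1 - j) 0 := by
  rw [List.getD_eq_getElem _ 0 (by simpa using hj),
      List.getD_eq_getElem _ 0 (by omega : xs.length - 1 - j < xs.length)]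
  rw [List.getElem_reverse]

-- per-index agreement of the next flags outside the wrap region
theorem pv_point_next (xs : List Int) (w : Int) (i : Nat) (hi : i < xs.length)
    (hnd : ¬ D_calculate_context_flags xs w) :
    pvANext xs w i = pvFlag w (xs.length - 1 - i) (pvLi xs.reverse (xs.length - 1 - i)) := by
  have hm : xs.length - 1 - i ≤ xs.reverse.length := by simp; omega
  rw [pv_flag_iff xs.reverse w _ hm]
  unfold pvANext
  rw [pv_slice_eq]
  have hcs : PySem.List.clampIdx xs.length ((i : Int) + 1) = i + 1 := by
    rw [pv_clampIdx_eq]; omega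
  rw [hcs]
  have hce : ((PySem.List.clampIdx xs.length ((i : Int) + 1 + w) : Nat) : Int)
      = min (max (if (i : Int) + 1 + w < 0 then (i : Int) + 1 + w + xs.length else (i : Int) + 1 + w) 0) (xs.length : Int) := by
    rw [pv_clampIdx_eq]; omega
  have hbridge : ∀ j' : Nat, j' < xs.length → (xs.reverse.getD j' 0 ≠ 0 ↔ xs.getD (xs.length - 1 - j') 0 ≠ 0) := by
    intro j' hj'; rw [pv_getD_reverse xs j' hj']
  cases hA : ((xs.drop (i + 1)).take
      (PySem.List.clampIdx xs.length ((i : Int) + 1 + w) - (i + 1))).any (fun v => decide (v ≠ 0)) with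
  | true =>
    obtain ⟨j, hja, hje, hjn, ht⟩ := (pv_seg_any xs (i + 1) _).mp hA
    by_cases hneg : (i : Int) + 1 + w < 0
    · exfalso
      exact hnd ⟨i, hi, hneg, j, hjn, by omega, by simp only [hneg, if_pos] at hce; omega, ht⟩
    · rw [if_pos rfl, if_pos ?_]
      refine ⟨xs.length - 1 - j, by omega, ?_, ?_⟩
      · simp only [hneg, if_neg, ite_false] at hce; omega
      · rw [pv_getD_reverse xs _ (by omega)]
        have : xs.length - 1 - (xs.length - 1 - j) = j := by omega
        rw [this]; exact ht
  | false =>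
    rw [if_neg (by simp), if_neg ?_]
    rintro ⟨j', hj', hjw, ht⟩
    by_cases hneg : (i : Int) + 1 + w < 0
    · omega
    · have hj'n : j' < xs.length := by simp at hm ⊢; omega
      rw [pv_getD_reverse xs j' hj'n] at ht
      have hseg : _ := (pv_seg_any xs (i + 1) (PySem.List.clampIdx xs.length ((i : Int) + 1 + w))).mpr
        ⟨xs.length - 1 - j', by omega, by simp only [hneg, if_neg, ite_false] at hce; omega, by omega, ht⟩
      rw [hA] at hseg; exact Bool.noConfusion hseg

-- representation of A's fold as a pair of maps
theorem pvA_repr (values : List Int) (w : Int) :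
    calculate_context_flags values w
      = ((List.range values.length).map (pvAPrior values w),
         (List.range values.length).map (pvANext values w)) := by
  unfold calculate_context_flags
  simp only [List.map_id']
  rw [pv_foldl_pair_append]
  simp

-- B's prior flags, element by element
theorem pvB_prior_getElem (values : List Int) (w : Int) (i : Nat) (hi : i < values.length)
    (h2 : i < (pvRecentFlags w values).length) :
    (pvRecentFlags w values)[i] = pvFlag w i (pvLi values i) := by
  rw [← List.getD_eq_getElem _ 0 h2]
  unfold pvRecentFlags
  rw [pvRecentGo_getD w values 0 none i hi]
  simp [pvLi]

-- B's next flags, element by element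
theorem pvB_next_getElem (values : List Int) (w : Int) (i : Nat) (hi : i < values.length)
    (h2 : i < ((pvRecentFlags w values.reverse).reverse).length) :
    ((pvRecentFlags w values.reverse).reverse)[i]
      = pvFlag w (values.length - 1 - i) (pvLi values.reverse (values.length - 1 - i)) := by
  have hlen : (pvRecentFlags w values.reverse).length = values.length := by
    simp [pvRecentFlags, pvRecentGo_length]
  rw [List.getElem_reverse]
  have hidx : (pvRecentFlags w values.reverse).length - 1 - i = values.length - 1 - i := by omega
  have hin : values.length - 1 - i < values.reverse.length := by simp; omega
  rw [← List.getD_eq_getElem _ 0]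
  rw [hidx]
  unfold pvRecentFlags
  rw [pvRecentGo_getD w values.reverse 0 none _ hin]
  simp [pvLi]

-- with a negative window B's flag is always 0
theorem pvB_flag_nonpos (values : List Int) (w : Int) (hw : w < 1) (m : Nat)
    (hm : m ≤ values.reverse.length) :
    pvFlag w m (pvLi values.reverse m) = 0 := by
  cases hL : pvLi values.reverse m with
  | none => rfl
  | some l =>
    obtain ⟨hl, _⟩ := pvLi_some values.reverse m hm l hL
    simp only [pvFlag]
    rw [if_neg (by omega)]

-- ===== VERDICT (by name: the statement is the Claim_ definition above) =====
theorem calculate_context_flags_spec : Claim_unchanged_calculate_context_flags := by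
  intro values w _
  unfold Spec_calculate_context_flags
  intro hnd
  rw [pvA_repr]
  unfold calculate_context_flags_alt
  simp only [List.map_id']
  refine Prod.ext ?_ ?_ <;> simp only
  · apply List.ext_getElem
    · simp [pvRecentFlags, pvRecentGo_length]
    · intro i h1 h2
      have hi : i < values.length := by simpa using h1
      rw [List.getElem_map, List.getElem_range, pvB_prior_getElem values w i hi h2]
      exact pv_point_prior values w i hi
  · apply List.ext_getElem
    · simp [pvRecentFlags, pvRecentGo_length]
    · intro i h1 h2
      have hi : i < values.length := by simpa using h1
      rw [List.getElem_map, List.getElem_range, pvB_next_getElem values w i hi h2]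
      exact pv_point_next values w i hi hnd

theorem calculate_context_flags_changed : Claim_changed_calculate_context_flags := by
  unfold Claim_changed_calculate_context_flags; decide

theorem calculate_context_flags_tight : Claim_exact_calculate_context_flags := by
  intro values w _ hD heq
  obtain ⟨i, hin, hneg, j, hjn, hij, hjw, htr⟩ := hD
  have hAi : pvANext values w i = 1 := by
    unfold pvANext
    rw [pv_slice_eq]
    have hcs : PySem.List.clampIdx values.length ((i : Int) + 1) = i + 1 := by
      rw [pv_clampIdx_eq]; omega
    have hce : ((PySem.List.clampIdx values.length ((i : Int) + 1 + w) : Nat) : Int)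
        = min (max ((i : Int) + 1 + w + values.length) 0) (values.length : Int) := by
      rw [pv_clampIdx_eq]
      rw [if_pos hneg]; omega
    rw [hcs]
    have hany := (pv_seg_any values (i + 1) (PySem.List.clampIdx values.length ((i : Int) + 1 + w))).mpr
      ⟨j, by omega, by omega, hjn, htr⟩
    rw [hany]
    rfl
  have hlenB : ((pvRecentFlags w values.reverse).reverse).length = values.length := by
    simp [pvRecentFlags, pvRecentGo_length]
  have h2 := congrArg (fun p : List Int × List Int => p.2[i]?) heq
  rw [pvA_repr] at h2
  simp only at h2
  rw [List.getElem?_eq_getElem (by simpa using hin),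
      List.getElem?_eq_getElem (by unfold calculate_context_flags_alt; simp only [List.map_id']; omega : i < (calculate_context_flags_alt values w).2.length)] at h2
  have hA' : ((List.range values.length).map (pvANext values w))[i]'(by simpa using hin) = 1 := by
    rw [List.getElem_map, List.getElem_range]; exact hAi
  have hB' : (calculate_context_flags_alt values w).2[i]'(by unfold calculate_context_flags_alt; simp only [List.map_id']; omega) = 0 := by
    have halt : (calculate_context_flags_alt values w).2 = (pvRecentFlags w values.reverse).reverse := by
      unfold calculate_context_flags_alt; simp only [List.map_id']
    rw [List.getElem_of_eq halt (by rw [halt, hlenB]; exact hin)]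
    rw [pvB_next_getElem values w i hin (by rw [hlenB]; exact hin)]
    exact pvB_flag_nonpos values w (by omega) _ (by simp; omega)
  rw [hA'] at h2
  rw [hB'] at h2
  exact one_ne_zero (Option.some.inj h2)
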